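-- pv_equiv track=rewrite | github.com/neulab/SpanNER | dataloaders/dataload.py | case_feature_spanLevel
-- ===== SOURCE A (Python) =====
-- def case_feature_spanLevel(spancase2idx_dic,span_idxs,words):
-- 	'''
-- 	this function use to characterize the capitalization feature.
-- 	:return:
-- 	'''
--
-- 	case2idx = {'isupper': 0, 'islower': 1, 'istitle': 2, 'isdigit': 3, 'other': 4}
--
-- 	caseidx = []
-- 	for idxs in span_idxs:
-- 		sid, eid = idxs
-- 		span_word = words[sid:eid+1]
-- 		caseidx1 = []
-- 		for token in span_word:
-- 			tfeat = ''
-- 			if token.isupper():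
-- 				tfeat='isupper'
-- 			elif token.islower():
-- 				tfeat = 'islower'
-- 			elif token.istitle():
-- 				tfeat = 'istitle'
-- 			elif token.isdigit():
-- 				tfeat = 'isdigit'
-- 			else:
-- 				tfeat = 'other'
-- 			caseidx1.append(tfeat)
--
-- 		caseidx1_str = ' '.join(caseidx1)
-- 		if caseidx1_str not in spancase2idx_dic:
-- 			spancase2idx_dic[caseidx1_str] = len(spancase2idx_dic)+1
-- 		caseidx.append(spancase2idx_dic[caseidx1_str])
--
-- 	return caseidx,spancase2idx_dic
-- ===== SOURCE B (Python) =====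
-- _CASE_TAGS = [('isupper', str.isupper), ('islower', str.islower),
--               ('istitle', str.istitle), ('isdigit', str.isdigit)]
--
--
-- def _case_tag(word):
--     for name, pred in _CASE_TAGS:
--         if pred(word):
--             return name
--     return 'other'
--
--
-- def case_feature_spanLevel(spancase2idx_dic, span_idxs, words):
--     feats = [_case_tag(w) for w in words]
--     keys = [' '.join(feats[sid:eid + 1]) for sid, eid in span_idxs]
--     caseidx = [spancase2idx_dic.setdefault(k, len(spancase2idx_dic) + 1)
--                for k in keys]
--     return caseidx, spancase2idx_dic
-- ===== Notes on version B (the rewrite author's own statement) =====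
-- stated objective: alternative
-- what changed: B is a staged pipeline: it tags every word once up front with a table-driven classifier, then builds each span key by slicing that feature list, then interns all keys with dict.setdefault in a final pass, instead of A's single nested loop that re-slices the word list and re-runs the if/elif chain per token of every span with an explicit membership test.
import Mathlib
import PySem

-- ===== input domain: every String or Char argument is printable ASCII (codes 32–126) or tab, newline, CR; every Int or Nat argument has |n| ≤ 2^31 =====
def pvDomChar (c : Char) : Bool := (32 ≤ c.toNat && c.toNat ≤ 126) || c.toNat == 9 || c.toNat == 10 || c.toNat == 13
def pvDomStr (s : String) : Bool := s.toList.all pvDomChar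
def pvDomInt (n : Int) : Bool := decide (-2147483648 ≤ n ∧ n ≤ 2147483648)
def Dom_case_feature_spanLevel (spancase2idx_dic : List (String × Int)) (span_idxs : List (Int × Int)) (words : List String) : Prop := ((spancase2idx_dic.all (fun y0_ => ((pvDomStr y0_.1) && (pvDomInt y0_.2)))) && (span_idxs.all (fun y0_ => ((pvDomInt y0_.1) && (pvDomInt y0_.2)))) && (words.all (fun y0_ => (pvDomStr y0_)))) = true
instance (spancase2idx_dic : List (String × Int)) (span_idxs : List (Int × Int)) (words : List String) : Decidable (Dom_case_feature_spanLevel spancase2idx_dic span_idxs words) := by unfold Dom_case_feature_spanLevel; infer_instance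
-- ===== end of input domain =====

-- B is a staged pipeline (tag every word once, slice the feature list per span, intern all keys with
-- setdefault) instead of A's nested loop; objective: alternative decomposition. Both Pythons mutate the
-- argument dict in place — the equivalence proved here is about the returned pair, which carries that dict.

-- ===== PORT A =====
-- str.isupper/islower/istitle have no PySem primitive: ported by hand, exact on the ASCII domain
-- (on ASCII the cased characters are exactly the letters).
def pvStrIsupper (cs : List Char) : Bool :=
  cs.any PySem.Chars.isupper && cs.all (fun c => !PySem.Chars.islower c)

def pvStrIslower (cs : List Char) : Bool :=
  cs.any PySem.Chars.islower && cs.all (fun c => !PySem.Chars.isupper c)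

-- CPython's istitle scan (ASCII): uppercase only after an uncased char, lowercase only after a cased one,
-- and at least one cased character; `prev` = previous char was cased, `found` = a cased char was seen.
def pvIstitleGo : List Char → Bool → Bool → Bool
  | [], _, found => found
  | c :: rest, prev, found =>
    if PySem.Chars.isupper c then (if prev then false else pvIstitleGo rest true true)
    else if PySem.Chars.islower c then (if prev then pvIstitleGo rest true true else false)
    else pvIstitleGo rest false found

def pvStrIstitle (cs : List Char) : Bool := pvIstitleGo cs false false

-- A's if/elif feature chain, verbatim
def pvFeat (token : String) : String :=
  if pvStrIsupper token.toList then "isupper"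
  else if pvStrIslower token.toList then "islower"
  else if pvStrIstitle token.toList then "istitle"
  else if PySem.Str.strIsdigit token then "isdigit"
  else "other"

def case_feature_spanLevel (spancase2idx_dic : List (String × Int)) (span_idxs : List (Int × Int)) (words : List String) : List Int × (List (String × Int)) :=
  let res := span_idxs.foldl (fun (st : List Int × PySem.Dict String Int) idxs =>
    let sid := idxs.1
    let eid := idxs.2
    let span_word := PySem.List.slice words (some sid) (some (eid + 1))
    let caseidx1 := span_word.foldl (fun acc token => acc ++ [pvFeat token]) ([] : List String)
    let caseidx1_str := PySem.Str.join " " caseidx1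
    let dic := if st.2.contains caseidx1_str then st.2 else st.2.insert caseidx1_str ((st.2.size : Int) + 1)
    (st.1 ++ [dic.getD caseidx1_str 0], dic)) ([], PySem.Dict.ofList spancase2idx_dic)
  (res.1, res.2.items)

-- ===== PORT B =====
-- Source B's table-driven classifier: a loop over (tag name, predicate) pairs.
def pvCaseTagTable : List (String × (String → Bool)) :=
  [("isupper", fun w => pvStrIsupper w.toList), ("islower", fun w => pvStrIslower w.toList),
   ("istitle", fun w => pvStrIstitle w.toList), ("isdigit", fun w => PySem.Str.strIsdigit w)]

def pvCaseTagLoop : List (String × (String → Bool)) → String → String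
  | [], _ => "other"
  | entry :: rest, w => if entry.2 w then entry.1 else pvCaseTagLoop rest w

def pvCaseTag (w : String) : String := pvCaseTagLoop pvCaseTagTable w

def case_feature_spanLevel_alt (spancase2idx_dic : List (String × Int)) (span_idxs : List (Int × Int)) (words : List String) : List Int × (List (String × Int)) :=
  let feats := words.map pvCaseTag
  let keys := span_idxs.map (fun p => PySem.Str.join " " (PySem.List.slice feats (some p.1) (some (p.2 + 1))))
  let res := keys.foldl (fun (st : List Int × PySem.Dict String Int) k =>
    -- Python's d.setdefault(k, v) returns the stored value: (d.get? k).getD v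
    let v := (st.2.get? k).getD ((st.2.size : Int) + 1)
    (st.1 ++ [v], st.2.setdefault k ((st.2.size : Int) + 1))) ([], PySem.Dict.ofList spancase2idx_dic)
  (res.1, res.2.items)

-- ===== PRECONDITION & SPEC =====
def Spec_case_feature_spanLevel (spancase2idx_dic : List (String × Int)) (span_idxs : List (Int × Int)) (words : List String) (out : List Int × (List (String × Int))) : Prop := out = case_feature_spanLevel_alt spancase2idx_dic span_idxs words
instance (spancase2idx_dic : List (String × Int)) (span_idxs : List (Int × Int)) (words : List String) (out : List Int × (List (String × Int))) : Decidable (Spec_case_feature_spanLevel spancase2idx_dic span_idxs words out) := by unfold Spec_case_feature_spanLevel; infer_instance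

-- ===== CLAIM (what is proved, stated in full; the proofs are below) =====
def Claim_equal_case_feature_spanLevel : Prop := ∀ (spancase2idx_dic : List (String × Int)) (span_idxs : List (Int × Int)) (words : List String), Dom_case_feature_spanLevel spancase2idx_dic span_idxs words → Spec_case_feature_spanLevel spancase2idx_dic span_idxs words (case_feature_spanLevel spancase2idx_dic span_idxs words)

-- ===== LEMMAS AND PROOFS =====

-- B's table loop computes A's if/elif chain
theorem pvCaseTag_eq_pvFeat (w : String) : pvCaseTag w = pvFeat w := by
  simp only [pvCaseTag, pvCaseTagTable, pvCaseTagLoop, pvFeat]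

-- slicing commutes with map (slice is clamped drop/take; map preserves length)
theorem pvSlice_map {α β : Type} (f : α → β) (xs : List α) (a b : Option Int) :
    PySem.List.slice (xs.map f) a b = (PySem.List.slice xs a b).map f := by
  simp [PySem.List.slice, PySem.List.clampIdx]

-- A's inner token loop is the map of pvFeat
theorem pvInnerLoopEqMap (span_word : List String) :
    span_word.foldl (fun acc token => acc ++ [pvFeat token]) ([] : List String) =
      span_word.map pvFeat := by
  simpa using PySem.List.foldl_append_singleton_eq_map pvFeat span_word []

-- A's membership-test-then-insert update equals B's setdefault, on both components
theorem pvIntern_eq (dic : PySem.Dict String Int) (k : String) :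
    (if dic.contains k then dic else dic.insert k ((dic.size : Int) + 1)) = dic.setdefault k ((dic.size : Int) + 1)
    ∧ (if dic.contains k then dic else dic.insert k ((dic.size : Int) + 1)).getD k 0 =
        (dic.get? k).getD ((dic.size : Int) + 1) := by
  by_cases h : dic.contains k = true
  · rw [PySem.Dict.setdefault_of_contains _ _ h]
    rcases hg : dic.get? k with _ | v
    · rw [PySem.Dict.contains_eq_isSome_get?, hg] at h; simp at h
    · simp [h, PySem.Dict.getD_of_get?_eq_some _ _ hg]
  · have h' : dic.contains k = false := by simpa using h
    rw [PySem.Dict.setdefault_of_not_contains _ _ h']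
    have hg : dic.get? k = none := by
      rw [PySem.Dict.contains_eq_isSome_get?] at h'
      cases hx : dic.get? k <;> simp [hx] at h' ⊢
    simp [h', hg, PySem.Dict.getD_insert_self]

-- the two outer folds agree
theorem pvMainFold (words : List String) (l : List (Int × Int)) (acc : List Int)
    (dic : PySem.Dict String Int) :
    l.foldl (fun (st : List Int × PySem.Dict String Int) idxs =>
      let span_word := PySem.List.slice words (some idxs.1) (some (idxs.2 + 1))
      let caseidx1 := span_word.foldl (fun acc token => acc ++ [pvFeat token]) ([] : List String)
      let caseidx1_str := PySem.Str.join " " caseidx1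
      let d := if st.2.contains caseidx1_str then st.2 else st.2.insert caseidx1_str ((st.2.size : Int) + 1)
      (st.1 ++ [d.getD caseidx1_str 0], d)) (acc, dic) =
    (l.map (fun p => PySem.Str.join " " (PySem.List.slice (words.map pvCaseTag) (some p.1) (some (p.2 + 1))))).foldl
      (fun (st : List Int × PySem.Dict String Int) k =>
        (st.1 ++ [(st.2.get? k).getD ((st.2.size : Int) + 1)], st.2.setdefault k ((st.2.size : Int) + 1))) (acc, dic) := by
  induction l generalizing acc dic with
  | nil => rfl
  | cons p rest ih =>
      simp only [List.foldl_cons, List.map_cons]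
      have hkey : PySem.Str.join " " (PySem.List.slice (words.map pvCaseTag) (some p.1) (some (p.2 + 1))) =
          PySem.Str.join " " ((PySem.List.slice words (some p.1) (some (p.2 + 1))).foldl
            (fun acc token => acc ++ [pvFeat token]) ([] : List String)) := by
        rw [pvInnerLoopEqMap, pvSlice_map]
        rw [show pvCaseTag = pvFeat from funext pvCaseTag_eq_pvFeat]
      rw [hkey]
      obtain ⟨hd, hv⟩ := pvIntern_eq dic (PySem.Str.join " " ((PySem.List.slice words (some p.1) (some (p.2 + 1))).foldl (fun acc token => acc ++ [pvFeat token]) ([] : List String)))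
      simp only [← hd, ← hv]
      exact ih _ _

-- ===== VERDICT (by name: the statement is the Claim_ definition above) =====
theorem case_feature_spanLevel_spec : Claim_equal_case_feature_spanLevel := by
  intro spancase2idx_dic span_idxs words _
  unfold Spec_case_feature_spanLevel case_feature_spanLevel case_feature_spanLevel_alt
  rw [pvMainFold]
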